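-- pv_equiv track=rewrite | github.com/PrinceSinghhub/GFG-Questions | Find the longest string.py | longestString
-- ===== SOURCE A (Python) =====
-- def longestString(arr, n):
--
--     # Sort the array in lexicographic order
--
--     arr.sort()
--
--     # Initialize a candidate for the longest string
--
--     candidate = ""
--
--     # Iterate through the sorted array
--
--     for s in arr:
--
--         # Check if all prefixes of s are present in the array
--
--         prefixes_present = True
--
--         for i in range(1, len(s)):
--
--             if s[:i] not in arr:
--                 prefixes_present = False
--
--                 break
--
--         # If all prefixes are present, update the candidate if necessary
--
--         if prefixes_present:
--
--             if len(s) > len(candidate):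
--                 candidate = s
--
--     # Return the candidate
--
--     return candidate
-- ===== SOURCE B (Python) =====
-- def longestString(arr, n):
--     # Sort in place like A (observable side effect on the caller's list).
--     arr.sort()
--     # In lexicographic order every proper prefix of s precedes s, so one pass
--     # with a set of already-validated strings replaces A's inner prefix scan.
--     valid = {""}
--     candidate = ""
--     for s in arr:
--         if s[:-1] in valid:
--             valid.add(s)
--             if len(s) > len(candidate):
--                 candidate = s
--     return candidate
-- ===== Notes on version B (the rewrite author's own statement) =====
-- stated objective: faster
-- what changed: Replaces A's per-string rescan of every prefix against the whole list with a single pass over the lex-sorted array maintaining a set of already-validated strings (each string only tests s[:-1] against that set), exploiting that every proper prefix precedes its extension in lexicographic order.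
import Mathlib
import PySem

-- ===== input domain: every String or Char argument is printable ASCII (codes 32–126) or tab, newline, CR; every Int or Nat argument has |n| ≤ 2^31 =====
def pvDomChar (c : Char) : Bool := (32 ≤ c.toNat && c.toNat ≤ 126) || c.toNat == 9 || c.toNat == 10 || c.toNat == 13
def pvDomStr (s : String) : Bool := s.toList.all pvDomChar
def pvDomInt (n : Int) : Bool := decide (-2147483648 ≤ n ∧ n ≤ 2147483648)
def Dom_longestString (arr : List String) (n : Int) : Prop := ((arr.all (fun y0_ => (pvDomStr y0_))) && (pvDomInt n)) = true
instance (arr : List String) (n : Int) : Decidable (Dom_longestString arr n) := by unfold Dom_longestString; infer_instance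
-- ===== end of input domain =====

-- B replaces A's per-string re-scan of all prefixes against the whole list by one pass over the
-- lex-sorted array with a set of already-validated strings (only s[:-1] is tested); measurably faster.
-- Both A and B sort the caller's list in place; the theorems below are about the return value.

-- ===== PORT A =====
-- A's inner loop: "prefixes_present" — every s[:i], 1 <= i < len(s), is in arr (early break = all)
def lsPrefOK (arr : List String) (s : String) : Bool :=
  (PySem.List.pyRange 1 (PySem.Str.len s) 1).all
    (fun i => arr.contains (PySem.Str.slice s none (some i)))

def longestString (arr : List String) (n : Int) : String :=
  let sa := PySem.List.sorted arr (fun x => x) false   -- arr.sort()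
  sa.foldl (fun candidate s =>
    if lsPrefOK sa s then
      if PySem.Str.len s > PySem.Str.len candidate then s else candidate
    else candidate) ""

-- ===== PORT B =====
def longestString_alt (arr : List String) (n : Int) : String :=
  let sa := PySem.List.sorted arr (fun x => x) false   -- arr.sort()
  (sa.foldl (fun (st : PySem.Set String × String) s =>
      if PySem.Set.contains st.1 (PySem.Str.slice s none (some (-1))) then
        (PySem.Set.add st.1 s,
         if PySem.Str.len s > PySem.Str.len st.2 then s else st.2)
      else st)
    (PySem.Set.ofList [""], "")).2

-- ===== PRECONDITION & SPEC =====
def Spec_longestString (arr : List String) (n : Int) (out : String) : Prop := out = longestString_alt arr n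
instance (arr : List String) (n : Int) (out : String) : Decidable (Spec_longestString arr n out) := by unfold Spec_longestString; infer_instance

-- ===== CLAIM (what is proved, stated in full; the proofs are below) =====
def Claim_equal_longestString : Prop := ∀ (arr : List String) (n : Int), Dom_longestString arr n → Spec_longestString arr n (longestString arr n)

-- ===== LEMMAS AND PROOFS =====

-- a strict proper prefix is lexicographically smaller
theorem lsDropLast_lex (l : List Char) (h : l ≠ []) : List.Lex (· < ·) l.dropLast l := by
  induction l with
  | nil => exact absurd rfl h
  | cons a t ih =>
    cases t with
    | nil => exact List.Lex.nil
    | cons b u =>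
      show List.Lex (· < ·) (a :: (b :: u).dropLast) (a :: b :: u)
      exact List.Lex.cons (ih (by simp))

theorem lsDropLast_lt (s : String) (h : s.toList ≠ []) :
    PySem.Str.slice s none (some (-1)) < s := by
  rw [String.lt_iff_toList_lt, PySem.Str.slice_to_neg_one]
  exact lsDropLast_lex s.toList h

-- bridge: the toList of a nonnegative-prefix slice
theorem lsSlice_toList (s : String) (k : Nat) :
    (PySem.Str.slice s none (some (k : Int))).toList = s.toList.take k := by
  simp [pysem]

-- Nat-indexed characterisation of A's inner loop
theorem lsPrefOK_iff (arr : List String) (s : String) :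
    lsPrefOK arr s = true ↔
      ∀ k : Nat, 1 ≤ k → k < s.toList.length →
        PySem.Str.slice s none (some (k : Int)) ∈ arr := by
  have hlen : PySem.Str.len s = (s.toList.length : Int) := by simp [pysem]
  unfold lsPrefOK
  rw [List.all_eq_true]
  constructor
  · intro H k hk1 hk2
    have hm : (k : Int) ∈ PySem.List.pyRange 1 (PySem.Str.len s) 1 := by
      rw [PySem.List.mem_pyRange_one, hlen]
      omega
    exact List.contains_iff_mem.mp (H _ hm)
  · intro H i hi
    rw [PySem.List.mem_pyRange_one, hlen] at hi
    have hik : i = ((i.toNat : Nat) : Int) := by omega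
    rw [List.contains_iff_mem, hik]
    exact H i.toNat (by omega) (by omega)

theorem lsPrefOK_short (arr : List String) (s : String) (h : s.toList.length ≤ 1) :
    lsPrefOK arr s = true := by
  rw [lsPrefOK_iff]
  intro k hk1 hk2
  omega

-- recurrence: s is valid iff s[:-1] is valid and s[:-1] is in arr (for len(s) ≥ 2)
theorem lsPrefOK_rec (arr : List String) (s : String) (h : 2 ≤ s.toList.length) :
    (lsPrefOK arr s = true ↔
      (lsPrefOK arr (PySem.Str.slice s none (some (-1))) = true ∧
       PySem.Str.slice s none (some (-1)) ∈ arr)) := by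
  set p := PySem.Str.slice s none (some (-1)) with hpdef
  have hp : p.toList = s.toList.dropLast := PySem.Str.slice_to_neg_one s
  have hpl : p.toList.length = s.toList.length - 1 := by
    rw [hp, List.length_dropLast]
  have hslice : ∀ k : Nat, k < s.toList.length - 1 →
      PySem.Str.slice p none (some (k : Int)) = PySem.Str.slice s none (some (k : Int)) := by
    intro k hk
    apply String.toList_inj.mp
    rw [lsSlice_toList, lsSlice_toList, hp, List.dropLast_eq_take, List.take_take]
    congr 1
    omega
  have htop : PySem.Str.slice s none (some ((s.toList.length - 1 : Nat) : Int)) = p := by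
    apply String.toList_inj.mp
    rw [lsSlice_toList, hp, List.dropLast_eq_take]
  rw [lsPrefOK_iff, lsPrefOK_iff]
  constructor
  · intro H
    constructor
    · intro k hk1 hk2
      rw [hpl] at hk2
      rw [hslice k (by omega)]
      exact H k hk1 (by omega)
    · have := H (s.toList.length - 1) (by omega) (by omega)
      rwa [htop] at this
  · rintro ⟨H1, H2⟩ k hk1 hk2
    by_cases hk : k < s.toList.length - 1
    · rw [← hslice k hk]
      exact H1 k hk1 (by omega)
    · have hke : k = s.toList.length - 1 := by omega
      rw [hke, htop]
      exact H2

-- the per-element tests of A and B agree under B's valid-set invariant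
theorem lsCond_eq (sa done rest v : List String) (s : String)
    (hps : sa.Pairwise (fun a b => a ≤ b)) (heq : sa = done ++ s :: rest)
    (hv : ∀ t : String, t ∈ v ↔ (t = "" ∨ (t ∈ done ∧ lsPrefOK sa t = true))) :
    lsPrefOK sa s = PySem.Set.contains v (PySem.Str.slice s none (some (-1))) := by
  rw [Bool.eq_iff_iff, PySem.Set.contains_iff]
  rcases Nat.lt_or_ge s.toList.length 2 with hs | hs
  · -- len(s) ≤ 1: both sides are true
    have h1 := lsPrefOK_short sa s (by omega)
    have hp0 : PySem.Str.slice s none (some (-1)) = "" := by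
      apply String.toList_eq_nil_iff.mp
      rw [PySem.Str.slice_to_neg_one]
      cases hl : s.toList with
      | nil => rfl
      | cons a t =>
        cases t with
        | nil => rfl
        | cons b u => rw [hl] at hs; simp at hs
    constructor
    · intro _
      rw [hp0]
      exact (hv "").mpr (Or.inl rfl)
    · intro _
      exact h1
  · -- len(s) ≥ 2
    set p := PySem.Str.slice s none (some (-1)) with hpdef
    have hp : p.toList = s.toList.dropLast := PySem.Str.slice_to_neg_one s
    have hpne : p ≠ "" := by
      intro hcon
      have h' : p.toList = [] := by rw [hcon]; rfl
      rw [hp] at h'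
      have h2 : s.toList.length - 1 = 0 := by
        have := congrArg List.length h'
        simpa [List.length_dropLast] using this
      omega
    have hlt : p < s := lsDropLast_lt s (by
      intro hcon
      rw [hcon] at hs
      simp at hs)
    rw [lsPrefOK_rec sa s hs, hv p]
    constructor
    · rintro ⟨hok, hmem⟩
      right
      refine ⟨?_, hok⟩
      rw [heq] at hmem
      rcases List.mem_append.mp hmem with hmem | hmem
      · exact hmem
      · exfalso
        rw [heq] at hps
        have h2 := (List.pairwise_append.mp hps).2.1
        rcases List.mem_cons.mp hmem with hmem | hmem
        · exact absurd (hmem ▸ hlt) (lt_irrefl s)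
        · exact absurd hlt (not_lt.mpr ((List.pairwise_cons.mp h2).1 p hmem))
    · rintro (h0 | ⟨hdone, hok⟩)
      · exact absurd h0 hpne
      · refine ⟨hok, ?_⟩
        rw [heq]
        exact List.mem_append.mpr (Or.inl hdone)

-- the two loops compute the same candidate
theorem lsLoop_eq (sa : List String) (hps : sa.Pairwise (fun a b => a ≤ b)) :
    ∀ (rest done v : List String) (cand : String),
      sa = done ++ rest →
      (∀ t : String, t ∈ v ↔ (t = "" ∨ (t ∈ done ∧ lsPrefOK sa t = true))) →
      rest.foldl (fun candidate s =>
          if lsPrefOK sa s then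
            if PySem.Str.len s > PySem.Str.len candidate then s else candidate
          else candidate) cand
      = (rest.foldl (fun (st : PySem.Set String × String) s =>
          if PySem.Set.contains st.1 (PySem.Str.slice s none (some (-1))) then
            (PySem.Set.add st.1 s,
             if PySem.Str.len s > PySem.Str.len st.2 then s else st.2)
          else st) (v, cand)).2 := by
  intro rest
  induction rest with
  | nil => intro done v cand _ _; rfl
  | cons s rest ih =>
    intro done v cand heq hv
    simp only [List.foldl_cons]
    have hc := lsCond_eq sa done rest v s hps heq hv
    have heq' : sa = (done ++ [s]) ++ rest := by
      rw [heq, List.append_cons]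
    by_cases hok : lsPrefOK sa s = true
    · rw [hok] at hc
      rw [if_pos hok, if_pos hc.symm]
      apply ih (done ++ [s]) (PySem.Set.add v s) _ heq'
      intro t
      constructor
      · intro h
        rcases (PySem.Set.mem_add v s t).mp h with h | h
        · rcases (hv t).mp h with h0 | ⟨hd, hk⟩
          · exact Or.inl h0
          · exact Or.inr ⟨List.mem_append.mpr (Or.inl hd), hk⟩
        · subst h
          exact Or.inr ⟨List.mem_append.mpr (Or.inr (List.mem_singleton.mpr rfl)), hok⟩
      · rintro (h0 | ⟨hd, hk⟩)
        · exact (PySem.Set.mem_add v s t).mpr (Or.inl ((hv t).mpr (Or.inl h0)))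
        · rcases List.mem_append.mp hd with hd | hd
          · exact (PySem.Set.mem_add v s t).mpr (Or.inl ((hv t).mpr (Or.inr ⟨hd, hk⟩)))
          · exact (PySem.Set.mem_add v s t).mpr (Or.inr (List.mem_singleton.mp hd))
    · rw [Bool.not_eq_true] at hok
      rw [hok] at hc
      rw [if_neg (by simp [hok]), if_neg (by rw [← hc]; simp)]
      apply ih (done ++ [s]) v cand heq'
      intro t
      rw [hv t]
      constructor
      · rintro (h0 | ⟨hd, hk⟩)
        · exact Or.inl h0
        · exact Or.inr ⟨List.mem_append.mpr (Or.inl hd), hk⟩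
      · rintro (h0 | ⟨hd, hk⟩)
        · exact Or.inl h0
        · rcases List.mem_append.mp hd with hd | hd
          · exact Or.inr ⟨hd, hk⟩
          · rw [List.mem_singleton.mp hd] at hk
            rw [hok] at hk
            exact absurd hk (by simp)

-- ===== VERDICT (by name: the statement is the Claim_ definition above) =====
theorem longestString_spec : Claim_equal_longestString := by
  intro arr n _
  unfold Spec_longestString longestString longestString_alt
  apply lsLoop_eq (PySem.List.sorted arr (fun x => x) false)
    (PySem.List.sorted_pairwise arr (fun x => x))
    (PySem.List.sorted arr (fun x => x) false) [] (PySem.Set.ofList [""]) ""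
    rfl
  intro t
  simp [PySem.Set.mem_ofList]
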